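-- pv_equiv track=rewrite | github.com/guilhermeam8/Projeto2 | funcoes.py | calcula_pontos_quadra
-- ===== SOURCE A (Python) =====
-- def calcula_pontos_quadra(faces):
--     for i in range(len(faces)):
--         numero = faces[i]
--         contador = 0
--         for k in range(len(faces)):
--             if faces[k] == numero:
--                 contador+=1
--         if contador >= 4:
--             soma = 0
--             for p in range(len(faces)):
--                 soma += faces[p]
--             return soma
--     return 0
-- ===== SOURCE B (Python) =====
-- def calcula_pontos_quadra(faces):
--     s = sorted(faces)
--     run = 0
--     prev = None
--     for x in s:
--         run = run + 1 if (run and x == prev) else 1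
--         prev = x
--         if run >= 4:
--             return sum(faces)
--     return 0
-- ===== Notes on version B (the rewrite author's own statement) =====
-- stated objective: faster
-- what changed: Replaces the quadratic per-element counting scan with sort-then-single-pass run detection, summing only when a run of 4 equal values is found.
import Mathlib
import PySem

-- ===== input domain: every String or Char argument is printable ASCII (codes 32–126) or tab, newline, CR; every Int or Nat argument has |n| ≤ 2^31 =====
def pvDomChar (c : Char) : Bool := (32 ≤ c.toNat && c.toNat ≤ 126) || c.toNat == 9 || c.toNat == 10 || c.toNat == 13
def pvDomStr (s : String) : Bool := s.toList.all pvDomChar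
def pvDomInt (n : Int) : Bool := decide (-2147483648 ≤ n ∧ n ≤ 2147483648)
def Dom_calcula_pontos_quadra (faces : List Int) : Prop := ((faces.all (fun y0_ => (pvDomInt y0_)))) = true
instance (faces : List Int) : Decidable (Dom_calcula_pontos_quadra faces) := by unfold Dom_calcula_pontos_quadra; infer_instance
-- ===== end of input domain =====

-- B replaces A's quadratic per-element counting with sort + one run-detection pass (faster, O(n log n)).

-- ===== PORT A =====
-- inner 'for k' counting loop
def pvCountA (faces : List Int) (numero : Int) : Int :=
  faces.foldl (fun contador k => if k = numero then contador + 1 else contador) 0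

-- inner 'for p' summing loop
def pvSumA (faces : List Int) : Int :=
  faces.foldl (fun soma p => soma + p) 0

-- outer 'for i' loop with early return
def pvLoopA (faces : List Int) : List Int → Int
  | [] => 0
  | numero :: rest =>
      if 4 ≤ pvCountA faces numero then pvSumA faces else pvLoopA faces rest

def calcula_pontos_quadra (faces : List Int) : Int := pvLoopA faces faces

-- ===== PORT B =====
-- the single pass over the sorted copy, tracking the current run length
def pvRunLoop (faces : List Int) (prev : Option Int) (run : Int) : List Int → Int
  | [] => 0
  | x :: rest =>
      let run' := if run ≠ 0 ∧ prev = some x then run + 1 else 1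
      if 4 ≤ run' then faces.sum else pvRunLoop faces (some x) run' rest

def calcula_pontos_quadra_alt (faces : List Int) : Int :=
  pvRunLoop faces none 0 (PySem.List.sorted faces (fun v => v) false)

-- ===== PRECONDITION & SPEC =====
def Spec_calcula_pontos_quadra (faces : List Int) (out : Int) : Prop := out = calcula_pontos_quadra_alt faces
instance (faces : List Int) (out : Int) : Decidable (Spec_calcula_pontos_quadra faces out) := by unfold Spec_calcula_pontos_quadra; infer_instance

-- ===== CLAIM (what is proved, stated in full; the proofs are below) =====
def Claim_equal_calcula_pontos_quadra : Prop := ∀ (faces : List Int), Dom_calcula_pontos_quadra faces → Spec_calcula_pontos_quadra faces (calcula_pontos_quadra faces)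

-- ===== LEMMAS AND PROOFS =====

theorem pvCountA_eq (faces : List Int) (n : Int) : pvCountA faces n = (faces.count n : Int) := by
  unfold pvCountA
  suffices h : ∀ (l : List Int) (c : Int),
      l.foldl (fun contador k => if k = n then contador + 1 else contador) c = c + (l.count n : Int) by
    simpa using h faces 0
  intro l
  induction l with
  | nil => simp
  | cons x xs ih =>
      intro c
      by_cases hx : x = n <;> simp [hx, ih]; ring

theorem pvSumA_eq (faces : List Int) : pvSumA faces = faces.sum := by
  unfold pvSumA
  suffices h : ∀ (l : List Int) (c : Int), l.foldl (fun s p => s + p) c = c + l.sum by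
    simpa using h faces 0
  intro l
  induction l with
  | nil => simp
  | cons x xs ih => intro c; simp [ih]; ring

theorem pvLoopA_eq (faces : List Int) (l : List Int) :
    pvLoopA faces l = if ∃ x ∈ l, 4 ≤ faces.count x then faces.sum else 0 := by
  induction l with
  | nil => simp [pvLoopA]
  | cons x rest ih =>
      by_cases hx : 4 ≤ faces.count x
      · have h1 : (4 : Int) ≤ pvCountA faces x := by rw [pvCountA_eq]; exact_mod_cast hx
        have h2 : ∃ y ∈ x :: rest, 4 ≤ faces.count y := ⟨x, List.mem_cons_self, hx⟩
        simp only [pvLoopA]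
        rw [if_pos h1, if_pos h2, pvSumA_eq]
      · have h1 : ¬ (4 : Int) ≤ pvCountA faces x := by rw [pvCountA_eq]; exact_mod_cast hx
        have hiff : (∃ y ∈ rest, 4 ≤ faces.count y) ↔ (∃ y ∈ x :: rest, 4 ≤ faces.count y) := by
          constructor
          · rintro ⟨y, hy, h4⟩; exact ⟨y, List.mem_cons_of_mem _ hy, h4⟩
          · rintro ⟨y, hy, h4⟩
            rcases List.mem_cons.mp hy with rfl | hy'
            · exact absurd h4 hx
            · exact ⟨y, hy', h4⟩
        simp only [pvLoopA, h1, if_false, ih]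
        exact if_congr hiff rfl rfl

theorem pvRunLoop_spec (faces : List Int) :
    ∀ (s : List Int) (p r : Int), s.Pairwise (· ≤ ·) → (∀ y ∈ s, p ≤ y) → 1 ≤ r → r ≤ 3 →
      pvRunLoop faces (some p) r s =
        (if 4 ≤ r + (s.count p : Int) ∨ ∃ x ∈ s, x ≠ p ∧ 4 ≤ s.count x then faces.sum else 0) := by
  intro s
  induction s with
  | nil => intro p r _ _ _ hr3; simp [pvRunLoop]; omega
  | cons x rest ih =>
      intro p r hpw hle hr1 hr3
      have hpw' : rest.Pairwise (· ≤ ·) := (List.pairwise_cons.mp hpw).2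
      have hxle : ∀ y ∈ rest, x ≤ y := (List.pairwise_cons.mp hpw).1
      have hstep : pvRunLoop faces (some p) r (x :: rest) =
          (if 4 ≤ (if r ≠ 0 ∧ (some p : Option Int) = some x then r + 1 else 1) then faces.sum
           else pvRunLoop faces (some x) (if r ≠ 0 ∧ (some p : Option Int) = some x then r + 1 else 1) rest) := rfl
      by_cases hpx : p = x
      · subst hpx
        have hrne : r ≠ 0 := by omega
        have hrun : (if r ≠ 0 ∧ (some p : Option Int) = some p then r + 1 else 1) = r + 1 :=
          if_pos ⟨hrne, rfl⟩
        rw [hstep, hrun]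
        have hcond : (4 ≤ (r + 1) + (rest.count p : Int) ∨ ∃ y ∈ rest, y ≠ p ∧ 4 ≤ rest.count y)
            ↔ (4 ≤ r + ((p :: rest).count p : Int) ∨ ∃ y ∈ p :: rest, y ≠ p ∧ 4 ≤ (p :: rest).count y) := by
          constructor
          · rintro (h | ⟨y, hy, hne, hc⟩)
            · left; rw [List.count_cons_self]; push_cast at *; omega
            · exact Or.inr ⟨y, List.mem_cons_of_mem _ hy, hne, by
                rwa [List.count_cons_of_ne (by simpa [eq_comm] using hne)]⟩
          · rintro (h | ⟨y, hy, hne, hc⟩)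
            · left; rw [List.count_cons_self] at h; push_cast at *; omega
            · rcases List.mem_cons.mp hy with rfl | hy'
              · exact absurd rfl hne
              · exact Or.inr ⟨y, hy', hne, by
                  rwa [List.count_cons_of_ne (by simpa [eq_comm] using hne)] at hc⟩
        by_cases h4 : 4 ≤ r + 1
        · rw [if_pos h4]
          have hc : 4 ≤ r + ((List.count p (p :: rest) : Nat) : Int) := by
            rw [List.count_cons_self]; push_cast; omega
          rw [if_pos (Or.inl hc)]
        · rw [if_neg h4, ih p (r + 1) hpw' hxle (by omega) (by omega)]
          exact if_congr hcond rfl rfl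
      · have hrun : (if r ≠ 0 ∧ (some p : Option Int) = some x then r + 1 else 1) = 1 := by
          rw [if_neg]; rintro ⟨_, he⟩; exact hpx (Option.some.inj he)
        have hplt : p < x := lt_of_le_of_ne (hle x List.mem_cons_self) hpx
        have hnp : p ∉ x :: rest := by
          intro hmem
          rcases List.mem_cons.mp hmem with rfl | hm
          · exact absurd rfl hpx
          · exact absurd (hxle p hm) (by omega)
        have hcnt0 : (x :: rest).count p = 0 := List.count_eq_zero.mpr hnp
        rw [hstep, hrun, if_neg (by omega : ¬ (4:Int) ≤ 1),
          ih x 1 hpw' hxle (by omega) (by omega)]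
        have hcond : (4 ≤ (1:Int) + (rest.count x : Int) ∨ ∃ y ∈ rest, y ≠ x ∧ 4 ≤ rest.count y)
            ↔ (4 ≤ r + ((x :: rest).count p : Int) ∨ ∃ y ∈ x :: rest, y ≠ p ∧ 4 ≤ (x :: rest).count y) := by
          rw [hcnt0]
          constructor
          · rintro (h | ⟨y, hy, hne, hc⟩)
            · exact Or.inr ⟨x, List.mem_cons_self, Ne.symm (ne_of_lt hplt), by
                rw [List.count_cons_self]; omega⟩
            · refine Or.inr ⟨y, List.mem_cons_of_mem _ hy, ?_, by
                rwa [List.count_cons_of_ne (by simpa [eq_comm] using hne)]⟩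
              have := hxle y hy; omega
          · rintro (h | ⟨y, hy, hne, hc⟩)
            · push_cast at h; omega
            · by_cases hyx : y = x
              · subst hyx
                left; rw [List.count_cons_self] at hc; push_cast; omega
              · rcases List.mem_cons.mp hy with rfl | hy'
                · exact absurd rfl hyx
                · exact Or.inr ⟨y, hy', hyx, by
                    rwa [List.count_cons_of_ne (by simpa [eq_comm] using hyx)] at hc⟩
        exact if_congr hcond rfl rfl

theorem alt_eq (faces : List Int) :
    calcula_pontos_quadra_alt faces = if ∃ x ∈ faces, 4 ≤ faces.count x then faces.sum else 0 := by
  unfold calcula_pontos_quadra_alt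
  have hperm : (PySem.List.sorted faces (fun v => v) false).Perm faces := PySem.List.sorted_perm ..
  have hpw : (PySem.List.sorted faces (fun v => v) false).Pairwise (· ≤ ·) := by
    simpa using PySem.List.sorted_pairwise (xs := faces) (key := fun v => v)
  rcases hs : PySem.List.sorted faces (fun v => v) false with _ | ⟨x, rest⟩
  · have : faces = [] := by
      have := hperm; rw [hs] at this; exact (List.Perm.nil_eq this).symm
    simp [this, pvRunLoop]
  · rw [hs] at hperm hpw
    have hpw' : rest.Pairwise (· ≤ ·) := (List.pairwise_cons.mp hpw).2
    have hxle : ∀ y ∈ rest, x ≤ y := (List.pairwise_cons.mp hpw).1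
    have h0 : ¬ ((0:Int) ≠ 0 ∧ (none : Option Int) = some x) := by simp
    simp only [pvRunLoop, h0, if_false, if_neg (by omega : ¬ (4:Int) ≤ 1)]
    rw [pvRunLoop_spec faces rest x 1 hpw' hxle (by omega) (by omega)]
    have hcnt : ∀ y : Int, (x :: rest).count y = faces.count y := fun y => hperm.count_eq y
    have hcond : (4 ≤ (1:Int) + (rest.count x : Int) ∨ ∃ y ∈ rest, y ≠ x ∧ 4 ≤ rest.count y)
        ↔ ∃ y ∈ faces, 4 ≤ faces.count y := by
      constructor
      · rintro (h | ⟨y, hy, hne, hc⟩)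
        · refine ⟨x, hperm.mem_iff.mp List.mem_cons_self, ?_⟩
          rw [← hcnt x, List.count_cons_self]; push_cast at h; omega
        · refine ⟨y, hperm.mem_iff.mp (List.mem_cons_of_mem _ hy), ?_⟩
          rw [← hcnt y, List.count_cons_of_ne (by simpa [eq_comm] using hne)]; exact hc
      · rintro ⟨y, hy, hc⟩
        have hy' : y ∈ x :: rest := hperm.mem_iff.mpr hy
        rw [← hcnt y] at hc
        by_cases hyx : y = x
        · subst hyx
          left; rw [List.count_cons_self] at hc; push_cast; omega
        · right
          rcases List.mem_cons.mp hy' with rfl | hy''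
          · exact absurd rfl hyx
          · exact ⟨y, hy'', hyx, by
              rwa [List.count_cons_of_ne (by simpa [eq_comm] using hyx)] at hc⟩
    exact if_congr hcond rfl rfl

-- ===== VERDICT (by name: the statement is the Claim_ definition above) =====
theorem calcula_pontos_quadra_spec : Claim_equal_calcula_pontos_quadra := by
  intro faces _
  unfold Spec_calcula_pontos_quadra
  rw [alt_eq, calcula_pontos_quadra, pvLoopA_eq]
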